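-- pv_equiv track=rewrite | github.com/AOrlov/kabanus | src/memory/context_builder.py | _collect_recent_lines
-- ===== SOURCE A (Python) =====
-- from typing import Callable, Dict, List, Optional, Tuple
--
-- def estimate_token_count(text: str) -> int:
--     return max(1, len(text) // 4)
--
-- def _format_message_line(msg: Dict) -> str:
--     sender = msg.get("sender", "Unknown")
--     text = msg.get("text", "")
--     return f"{sender}: {text}"
--
-- def _collect_recent_lines(
--     messages: List[Dict], max_turns: int, token_limit: int
-- ) -> Tuple[List[str], int]:
--     context_lines = []
--     total_tokens = 0
--     turns_used = 0
--
--     for msg in reversed(messages):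
--         if turns_used >= max_turns:
--             break
--         line = _format_message_line(msg)
--         tokens = estimate_token_count(line)
--         if total_tokens + tokens > token_limit:
--             break
--         context_lines.append(line)
--         total_tokens += tokens
--         turns_used += 1
--
--     context_lines.reverse()
--     return context_lines, total_tokens
-- ===== SOURCE B (Python) =====
-- def estimate_token_count(text: str) -> int:
--     return max(1, len(text) // 4)
--
-- def _format_message_line(msg) -> str:
--     return f"{msg.get('sender', 'Unknown')}: {msg.get('text', '')}"
--
-- def _collect_recent_lines(messages, max_turns, token_limit):
--     # Phase 1: prefix sums of token costs of the messages, newest first.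
--     n = len(messages)
--     prefix = []
--     s = 0
--     for m in reversed(messages):
--         s += estimate_token_count(_format_message_line(m))
--         prefix.append(s)
--     # Phase 2: cutoff = how many newest messages fit both budgets.
--     cap = min(n, max(max_turns, 0))
--     count = 0
--     while count < cap and prefix[count] <= token_limit:
--         count += 1
--     total = prefix[count - 1] if count else 0
--     # Phase 3: format the forward window; no reverse of the result needed.
--     return [_format_message_line(m) for m in messages[n - count:]], total
-- ===== Notes on version B (the rewrite author's own statement) =====
-- stated objective: alternative
-- what changed: A accumulates formatted lines in one backward loop with a break and a final reverse; B first builds a prefix-sum table of token costs (newest first), reads the cutoff count off that table with a bounded search, and then formats the forward slice messages[n-count:] with a comprehension, so the output list is never reversed.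
import Mathlib
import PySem

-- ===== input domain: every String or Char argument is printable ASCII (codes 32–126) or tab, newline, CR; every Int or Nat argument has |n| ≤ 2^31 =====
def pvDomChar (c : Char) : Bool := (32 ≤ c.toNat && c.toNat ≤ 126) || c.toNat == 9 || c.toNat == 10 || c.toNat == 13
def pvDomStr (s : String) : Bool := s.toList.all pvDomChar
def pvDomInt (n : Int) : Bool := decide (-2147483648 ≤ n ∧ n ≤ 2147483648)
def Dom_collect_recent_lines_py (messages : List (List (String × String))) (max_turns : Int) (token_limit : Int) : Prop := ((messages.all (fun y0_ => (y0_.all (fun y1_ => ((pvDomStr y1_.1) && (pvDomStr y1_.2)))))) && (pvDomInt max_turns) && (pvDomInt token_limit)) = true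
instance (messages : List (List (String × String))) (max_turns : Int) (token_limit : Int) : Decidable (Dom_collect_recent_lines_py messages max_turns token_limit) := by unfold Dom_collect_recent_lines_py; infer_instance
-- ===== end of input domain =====

-- B replaces A's single backward accumulate-and-reverse loop by a prefix-sum table of
-- token costs, a bounded cutoff search over that table, and a forward slice formatted
-- by a map (no reverse of the result). Objective: alternative.

-- shared module helpers (both Pythons call the same estimate_token_count / _format_message_line)
def pvEstimateTokens (text : String) : Int :=
  max 1 (PySem.Int.floordiv (PySem.Str.len text) 4)

def pvFormatLine (msg : List (String × String)) : String :=
  PySem.Dict.getD (PySem.Dict.mk msg) "sender" "Unknown" ++ ": " ++ PySem.Dict.getD (PySem.Dict.mk msg) "text" ""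

-- ===== PORT A =====
-- A's loop over reversed(messages), appending lines, then a final reverse
def pvALoop (max_turns token_limit : Int) :
    List (List (String × String)) → List String → Int → Int → List String × Int
  | [], context_lines, total_tokens, _ => (context_lines.reverse, total_tokens)
  | msg :: rest, context_lines, total_tokens, turns_used =>
      if turns_used ≥ max_turns then (context_lines.reverse, total_tokens)
      else
        let line := pvFormatLine msg
        let tokens := pvEstimateTokens line
        if total_tokens + tokens > token_limit then (context_lines.reverse, total_tokens)
        else pvALoop max_turns token_limit rest (context_lines ++ [line]) (total_tokens + tokens) (turns_used + 1)

def collect_recent_lines_py (messages : List (List (String × String))) (max_turns : Int) (token_limit : Int) : List String × Int :=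
  pvALoop max_turns token_limit messages.reverse [] 0 0

-- ===== PORT B =====
-- B phase 1: running prefix sums s of the costs of the reversed messages
def pvPrefix : List (List (String × String)) → Int → List Int
  | [], _ => []
  | m :: rest, s =>
      let s' := s + pvEstimateTokens (pvFormatLine m)
      s' :: pvPrefix rest s'

-- B phase 2: the while loop 'while count < cap and prefix[count] <= token_limit';
-- cap ≤ length prefix in B, so walking the list with cap as a bound is exact
def pvCutoff (token_limit : Int) : Nat → List Int → Nat
  | 0, _ => 0
  | _, [] => 0
  | cap + 1, p :: rest => if p ≤ token_limit then pvCutoff token_limit cap rest + 1 else 0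

def collect_recent_lines_py_alt (messages : List (List (String × String))) (max_turns : Int) (token_limit : Int) : List String × Int :=
  let n := messages.length
  let pref := pvPrefix messages.reverse 0
  -- cap = min(n, max(max_turns, 0)); Int.toNat clamps negatives to 0, exact here
  let cap : Nat := min n max_turns.toNat
  let count := pvCutoff token_limit cap pref
  let total : Int := if count = 0 then 0 else pref.getD (count - 1) 0
  ((PySem.List.slice messages (some ((n : Int) - (count : Int))) none).map pvFormatLine, total)

-- ===== PRECONDITION & SPEC =====
def Spec_collect_recent_lines_py (messages : List (List (String × String))) (max_turns : Int) (token_limit : Int) (out : List String × Int) : Prop := out = collect_recent_lines_py_alt messages max_turns token_limit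
instance (messages : List (List (String × String))) (max_turns : Int) (token_limit : Int) (out : List String × Int) : Decidable (Spec_collect_recent_lines_py messages max_turns token_limit out) := by unfold Spec_collect_recent_lines_py; infer_instance

-- ===== CLAIM (what is proved, stated in full; the proofs are below) =====
def Claim_equal_collect_recent_lines_py : Prop := ∀ (messages : List (List (String × String))) (max_turns : Int) (token_limit : Int), Dom_collect_recent_lines_py messages max_turns token_limit → Spec_collect_recent_lines_py messages max_turns token_limit (collect_recent_lines_py messages max_turns token_limit)

-- ===== LEMMAS AND PROOFS =====

theorem pvCutoff_le (token_limit : Int) (cap : Nat) (l : List Int) :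
    pvCutoff token_limit cap l ≤ cap := by
  induction l generalizing cap with
  | nil => cases cap <;> simp [pvCutoff]
  | cons p rest ih =>
      cases cap with
      | zero => simp [pvCutoff]
      | succ c =>
          simp only [pvCutoff]
          split_ifs
          · exact Nat.succ_le_succ (ih c)
          · exact Nat.zero_le _

-- A's backward loop, characterised through B's cutoff count over the prefix sums
theorem pvALoop_eq (max_turns token_limit : Int)
    (rs : List (List (String × String))) (lines : List String) (total turns : Int) :
    pvALoop max_turns token_limit rs lines total turns =
      ((lines ++ (rs.take (pvCutoff token_limit (min rs.length (max_turns - turns).toNat) (pvPrefix rs total))).map pvFormatLine).reverse,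
       if pvCutoff token_limit (min rs.length (max_turns - turns).toNat) (pvPrefix rs total) = 0 then total
       else (pvPrefix rs total).getD (pvCutoff token_limit (min rs.length (max_turns - turns).toNat) (pvPrefix rs total) - 1) 0) := by
  induction rs generalizing lines total turns with
  | nil => simp [pvALoop, pvPrefix, pvCutoff]
  | cons msg rest ih =>
      by_cases h1 : turns ≥ max_turns
      · have h0 : min (rest.length + 1) (max_turns - turns).toNat = 0 := by omega
        simp [pvALoop, h1, h0, pvCutoff]
      · have hm : min (msg :: rest).length (max_turns - turns).toNat =
            (min rest.length (max_turns - turns - 1).toNat) + 1 := by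
          simp only [List.length_cons]; omega
        simp only [pvALoop, if_neg h1, pvPrefix, hm, pvCutoff]
        by_cases h2 : total + pvEstimateTokens (pvFormatLine msg) > token_limit
        · rw [if_pos h2, if_neg (by omega)]
          simp
        · rw [if_neg h2, if_pos (by omega), ih]
          have harg : max_turns - (turns + 1) = max_turns - turns - 1 := by omega
          rw [harg]
          set k := pvCutoff token_limit (min rest.length (max_turns - turns - 1).toNat)
            (pvPrefix rest (total + pvEstimateTokens (pvFormatLine msg))) with hkdef
          refine Prod.ext ?_ ?_
          · simp [List.take_succ_cons, List.append_assoc]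
          · cases k with
            | zero => simp
            | succ k' =>
                simp only [Nat.succ_ne_zero, if_false, Nat.add_sub_cancel]
                cases k' with
                | zero => simp
                | succ k'' => simp

-- ===== VERDICT (by name: the statement is the Claim_ definition above) =====
theorem collect_recent_lines_py_spec : Claim_equal_collect_recent_lines_py := by
  intro messages max_turns token_limit _
  unfold Spec_collect_recent_lines_py collect_recent_lines_py collect_recent_lines_py_alt
  rw [pvALoop_eq]
  simp only [List.length_reverse, Int.sub_zero]
  set k := pvCutoff token_limit (min messages.length max_turns.toNat)
    (pvPrefix messages.reverse 0) with hk
  have hkle : k ≤ messages.length :=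
    le_trans (pvCutoff_le _ _ _) (Nat.min_le_left _ _)
  have hnn : (0 : Int) ≤ (messages.length : Int) - (k : Int) := by omega
  rw [PySem.List.slice_from messages hnn]
  have htn : ((messages.length : Int) - (k : Int)).toNat = messages.length - k := by omega
  rw [htn]
  refine Prod.ext ?_ rfl
  simp only [List.nil_append]
  rw [List.take_reverse, List.map_reverse, List.reverse_reverse]
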